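-- pv_equiv track=rewrite | github.com/parthjpatel99/Bctci-code-solutions | stacks and queues/compare_array_by_k.py | compress_array_k
-- ===== SOURCE A (Python) =====
-- def compress_array_k(arr, k):
--     stack = []
--     def merge(num):
--         if not stack or stack[-1][0] != num:
--             stack.append([num, 1])
--         elif stack[-1][1] < k-1:
--             stack[-1][1] += 1
--         else:
--             stack.pop()
--             merge(num * k)
--     for num in arr:
--         merge(num)
--
--     res = []
--     for num, count in stack:
--         for _ in range(count):
--             res.append(num)
--     return res
-- ===== SOURCE B (Python) =====
-- def compress_array_k(arr, k):
--     # Flat stack of plain values (no [value,count] pairs): after pushing a value,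
--     # whenever the top k-1 elements all equal the incoming value, collapse them
--     # and carry value*k. The stack itself is the answer; no expansion pass.
--     stack = []
--     for num in arr:
--         while k >= 2 and len(stack) >= k - 1 and all(stack[-1 - i] == num for i in range(k - 1)):
--             del stack[-(k - 1):]
--             num *= k
--         stack.append(num)
--     return stack
-- ===== Notes on version B (the rewrite author's own statement) =====
-- stated objective: alternative
-- what changed: B replaces A's stack of [value,count] pairs with recursive carry and a final count-expansion pass by a flat stack of plain values whose top k-1 elements are collapsed in an inner while loop; the stack itself is the result, so the expansion pass disappears.
-- intended difference: On inputs with k < 2 and at least one adjacent equal pair, A's recursive merge collapses runs (e.g. A([2,2],1)=[2], A([5,5],0)=[0]); B returns the array unchanged, the intended value since no group of k>=2 equal elements can be compressed. — e.g. on compress_array_k([2, 2], 1): A returns [2], B returns [2, 2]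
import Mathlib
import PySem

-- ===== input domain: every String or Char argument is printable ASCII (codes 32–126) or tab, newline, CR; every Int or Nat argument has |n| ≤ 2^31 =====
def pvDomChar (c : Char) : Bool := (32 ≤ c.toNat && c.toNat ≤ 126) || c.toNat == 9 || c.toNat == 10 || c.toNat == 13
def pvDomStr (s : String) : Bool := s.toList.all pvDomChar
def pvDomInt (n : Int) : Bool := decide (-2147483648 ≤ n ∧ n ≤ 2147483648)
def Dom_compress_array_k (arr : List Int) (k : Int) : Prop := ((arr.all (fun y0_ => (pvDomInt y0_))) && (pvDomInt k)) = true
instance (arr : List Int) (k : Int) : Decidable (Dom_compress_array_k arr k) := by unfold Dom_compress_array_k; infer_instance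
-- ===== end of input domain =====

-- B replaces the [value,count] pair stack + recursive merge + final expansion pass of A by a
-- flat stack of plain values collapsed in place; same result except on the k<2 corner stated at D_.

-- ===== PORT A =====
-- A's recursive helper `merge`; the Lean stack keeps Python's TOP at the HEAD,
-- so python `stack[-1]` is the head and the final bottom-to-top walk uses `.reverse`.
def mergeA (k : Int) : List (Int × Int) → Int → List (Int × Int)
  | [], num => [(num, 1)]
  | (v, c) :: rest, num =>
    if v ≠ num then (num, 1) :: (v, c) :: rest
    else if c < k - 1 then (v, c + 1) :: rest
    else mergeA k rest (num * k)

def compress_array_k (arr : List Int) (k : Int) : List Int :=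
  let stack := arr.foldl (fun s num => mergeA k s num) []
  (stack.reverse).foldl
    (fun res vc => (PySem.List.pyRange 0 vc.2 1).foldl (fun r _ => r ++ [vc.1]) res) []

-- ===== PORT B =====
-- Source B's inner `while` loop (head of the list = top of the python stack):
-- the top-down scan `all(stack[-1-i] == num for i in range(k-1))` is `(take (k-1)).all`
-- here and `del stack[-(k-1):]` is `drop (k-1)`.
def stepB (k : Int) (stack : List Int) (num : Int) : List Int :=
  if _h : 2 ≤ k ∧ (k - 1).toNat ≤ stack.length ∧ (stack.take (k - 1).toNat).all (fun x => x == num) then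
    stepB k (stack.drop (k - 1).toNat) (num * k)
  else num :: stack
termination_by stack.length
decreasing_by
  simp only [List.length_drop]
  omega

def compress_array_k_alt (arr : List Int) (k : Int) : List Int :=
  (arr.foldl (fun s num => stepB k s num) []).reverse

-- ===== PRECONDITION & SPEC =====
-- On inputs with k < 2 and an adjacent equal pair, A collapses runs (A([2,2],1)=[2], A([5,5],0)=[0]);
-- B returns the array unchanged, the intended value since no group of k≥2 equal elements exists.
def D_compress_array_k (arr : List Int) (k : Int) : Prop :=
  k < 2 ∧ (arr.zip arr.tail).any (fun p => p.1 == p.2) = true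
instance (arr : List Int) (k : Int) : Decidable (D_compress_array_k arr k) := by
  unfold D_compress_array_k; infer_instance

def Spec_compress_array_k (arr : List Int) (k : Int) (out : List Int) : Prop :=
  ¬ D_compress_array_k arr k → out = compress_array_k_alt arr k
instance (arr : List Int) (k : Int) (out : List Int) : Decidable (Spec_compress_array_k arr k out) := by
  unfold Spec_compress_array_k; infer_instance

def pvDiffWitness_compress_array_k : List Int × Int := ([2, 2], 1)
def pvDiffWitnessOut_compress_array_k : (List Int) × (List Int) := ([2], [2, 2])

-- ===== CLAIM (what is proved, stated in full; the proofs are below) =====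
def Claim_unchanged_compress_array_k : Prop := ∀ (arr : List Int) (k : Int), Dom_compress_array_k arr k → Spec_compress_array_k arr k (compress_array_k arr k)
def Claim_changed_compress_array_k : Prop := Dom_compress_array_k (pvDiffWitness_compress_array_k.1) (pvDiffWitness_compress_array_k.2) ∧ D_compress_array_k (pvDiffWitness_compress_array_k.1) (pvDiffWitness_compress_array_k.2) ∧ compress_array_k (pvDiffWitness_compress_array_k.1) (pvDiffWitness_compress_array_k.2) = pvDiffWitnessOut_compress_array_k.1 ∧ compress_array_k_alt (pvDiffWitness_compress_array_k.1) (pvDiffWitness_compress_array_k.2) = pvDiffWitnessOut_compress_array_k.2 ∧ pvDiffWitnessOut_compress_array_k.1 ≠ pvDiffWitnessOut_compress_array_k.2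

-- ===== LEMMAS AND PROOFS =====

-- flat view of A's pair stack
def flatS (s : List (Int × Int)) : List Int :=
  s.flatMap (fun vc => List.replicate vc.2.toNat vc.1)

-- invariant on A's stack: counts in [1, k-1], adjacent values distinct
def GoodS (k : Int) (s : List (Int × Int)) : Prop :=
  (∀ vc ∈ s, 1 ≤ vc.2 ∧ vc.2 ≤ k - 1) ∧ s.IsChain (fun a b => a.1 ≠ b.1)

theorem stepB_small {k : Int} (hk : ¬ 2 ≤ k) (s : List Int) (num : Int) :
    stepB k s num = num :: s := by
  rw [stepB, dif_neg]
  intro h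
  exact hk h.1

theorem flatS_cons (v c : Int) (tl : List (Int × Int)) :
    flatS ((v, c) :: tl) = List.replicate c.toNat v ++ flatS tl := by
  simp [flatS]

theorem rep_fold {α β : Type} (l : List α) (v : β) :
    ∀ res : List β, l.foldl (fun r _ => r ++ [v]) res = res ++ List.replicate l.length v := by
  induction l with
  | nil => intro res; simp
  | cons a t ih =>
    intro res
    simp only [List.foldl_cons, List.length_cons, ih, List.replicate_succ]
    simp

theorem step_merge (k : Int) (hk : 2 ≤ k) :
    ∀ (s : List (Int × Int)) (num : Int), GoodS k s →
      stepB k (flatS s) num = flatS (mergeA k s num) ∧ GoodS k (mergeA k s num) := by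
  intro s
  have hm1 : 1 ≤ (k - 1).toNat := by omega
  induction s with
  | nil =>
    intro num _
    constructor
    · rw [show flatS [] = [] from rfl, stepB, dif_neg]
      · simp [mergeA, flatS]
      · rintro ⟨-, h2, -⟩
        simp at h2
        omega
    · refine ⟨?_, ?_⟩
      · intro vc hvc
        simp [mergeA] at hvc
        subst hvc
        omega
      · simp [mergeA]
  | cons hd tl ih =>
    obtain ⟨v, c⟩ := hd
    intro num hg
    have hc := hg.1 (v, c) List.mem_cons_self
    have hc1 : 1 ≤ c := hc.1
    have hck : c ≤ k - 1 := hc.2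
    have hgtl : GoodS k tl := ⟨fun vc h => hg.1 vc (List.mem_cons_of_mem _ h), hg.2.tail⟩
    by_cases hv : v = num
    · by_cases hlt : c < k - 1
      · -- increment branch
        have hmerge : mergeA k ((v, c) :: tl) num = (v, c + 1) :: tl := by
          simp [mergeA, hv, hlt]
        refine ⟨?_, ?_⟩
        · rw [flatS_cons, hmerge, flatS_cons, stepB, dif_neg]
          · subst hv
            have : (c + 1).toNat = c.toNat + 1 := by omega
            rw [this, List.replicate_succ]
            rfl
          · rintro ⟨-, hlen, hall⟩
            simp only [List.length_append, List.length_replicate] at hlen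
            -- the (k-1)-window reaches into flatS tl, whose first value differs from v
            have hflne : flatS tl ≠ [] := by
              intro h0
              rw [h0] at hlen
              simp at hlen
              omega
            obtain ⟨v2, c2, tl2, rfl⟩ : ∃ v2 c2 tl2, tl = (v2, c2) :: tl2 := by
              cases tl with
              | nil => exact absurd rfl hflne
              | cons p tl2 => exact ⟨p.1, p.2, tl2, rfl⟩
            have hc2 := (hgtl.1 (v2, c2) List.mem_cons_self).1
            have hne2 : v ≠ v2 := (List.isChain_cons_cons.mp hg.2).1
            rw [List.take_append] at hall
            have hcm : (List.replicate c.toNat v).take (k - 1).toNat = List.replicate c.toNat v := by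
              apply List.take_of_length_le
              simp
              omega
            rw [hcm, List.all_append] at hall
            have hall2 := (Bool.and_eq_true_iff.mp hall).2
            simp only [List.length_replicate] at hall2
            obtain ⟨j, hj⟩ : ∃ j, (k - 1).toNat - c.toNat = j + 1 := ⟨(k - 1).toNat - c.toNat - 1, by omega⟩
            obtain ⟨n2, hn2⟩ : ∃ n2, c2.toNat = n2 + 1 := ⟨c2.toNat - 1, by omega⟩
            rw [flatS_cons, hj, hn2, List.replicate_succ] at hall2
            simp only [List.cons_append, List.take_succ_cons, List.all_cons,
              Bool.and_eq_true_iff, beq_iff_eq] at hall2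
            exact hne2 (hv ▸ hall2.1.symm ▸ rfl)
        · refine ⟨?_, ?_⟩
          · intro vc hvc
            rw [hmerge] at hvc
            rcases List.mem_cons.mp hvc with h | h
            · subst h; constructor <;> omega
            · exact hgtl.1 vc h
          · rw [hmerge]
            cases tl with
            | nil => exact List.isChain_singleton _
            | cons p tl2 =>
              exact List.isChain_cons_cons.mpr
                ⟨(List.isChain_cons_cons.mp hg.2).1, hgtl.2⟩
      · -- carry branch: c = k - 1
        have hck' : c = k - 1 := by omega
        have hmerge : mergeA k ((v, c) :: tl) num = mergeA k tl (num * k) := by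
          simp [mergeA, hv, hlt]
        have hcond : 2 ≤ k ∧ (k - 1).toNat ≤ (flatS ((v, c) :: tl)).length ∧
            ((flatS ((v, c) :: tl)).take (k - 1).toNat).all (fun x => x == num) := by
          refine ⟨hk, ?_, ?_⟩
          · rw [flatS_cons]
            simp
            omega
          · rw [flatS_cons, List.take_append]
            have h1 : (List.replicate c.toNat v).take (k - 1).toNat = List.replicate c.toNat v := by
              apply List.take_of_length_le
              simp
              omega
            have h2 : (k - 1).toNat - (List.replicate c.toNat v).length = 0 := by
              simp
              omega
            rw [h1, h2, List.take_zero, List.append_nil, List.all_eq_true]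
            intro x hx
            rw [List.eq_of_mem_replicate hx, hv]
            simp
        refine ⟨?_, ?_⟩
        · rw [stepB, dif_pos hcond, hmerge]
          have hdrop : (flatS ((v, c) :: tl)).drop (k - 1).toNat = flatS tl := by
            rw [flatS_cons, List.drop_append]
            have h1 : (List.replicate c.toNat v).drop (k - 1).toNat = [] := by
              apply List.drop_of_length_le
              simp
              omega
            have h2 : (k - 1).toNat - (List.replicate c.toNat v).length = 0 := by
              simp
              omega
            rw [h1, h2, List.drop_zero, List.nil_append]
          rw [hdrop]
          exact (ih (num * k) hgtl).1
        · rw [hmerge]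
          exact (ih (num * k) hgtl).2
    · -- push branch
      have hmerge : mergeA k ((v, c) :: tl) num = (num, 1) :: (v, c) :: tl := by
        simp [mergeA, hv]
      refine ⟨?_, ?_⟩
      · rw [hmerge, flatS_cons, stepB, dif_neg]
        · have : flatS ((num, 1) :: (v, c) :: tl)
              = List.replicate (1 : Int).toNat num ++ flatS ((v, c) :: tl) := flatS_cons ..
          rw [this, flatS_cons]
          rfl
        · rintro ⟨-, -, hall⟩
          obtain ⟨n1, hn1⟩ : ∃ n1, c.toNat = n1 + 1 := ⟨c.toNat - 1, by omega⟩
          obtain ⟨m', hm'⟩ : ∃ m', (k - 1).toNat = m' + 1 := ⟨(k - 1).toNat - 1, by omega⟩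
          rw [hn1, hm', List.replicate_succ] at hall
          simp only [List.cons_append, List.take_succ_cons, List.all_cons,
            Bool.and_eq_true_iff, beq_iff_eq] at hall
          exact hv hall.1
      · refine ⟨?_, ?_⟩
        · intro vc hvc
          rw [hmerge] at hvc
          rcases List.mem_cons.mp hvc with h | h
          · subst h; constructor <;> omega
          · exact hg.1 vc h
        · rw [hmerge]
          exact List.isChain_cons_cons.mpr ⟨fun h => hv h.symm, hg.2⟩

theorem foldl_step_merge (k : Int) (hk : 2 ≤ k) (arr : List Int) :
    ∀ (s : List (Int × Int)), GoodS k s →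
      arr.foldl (fun s num => stepB k s num) (flatS s)
        = flatS (arr.foldl (fun s num => mergeA k s num) s)
      ∧ GoodS k (arr.foldl (fun s num => mergeA k s num) s) := by
  induction arr with
  | nil => intro s hg; exact ⟨rfl, hg⟩
  | cons a t ih =>
    intro s hg
    have h1 := step_merge k hk s a hg
    simpa [List.foldl_cons, h1.1] using ih (mergeA k s a) h1.2

-- the expansion phase of A computes the reverse of the flat view
theorem phaseA (s : List (Int × Int)) :
    (s.reverse).foldl
        (fun res vc => (PySem.List.pyRange 0 vc.2 1).foldl (fun r _ => r ++ [vc.1]) res) []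
      = (flatS s).reverse := by
  have hfun : (fun (res : List Int) (vc : Int × Int) =>
        (PySem.List.pyRange 0 vc.2 1).foldl (fun r _ => r ++ [vc.1]) res)
      = fun res vc => res ++ List.replicate vc.2.toNat vc.1 := by
    funext res vc
    rw [rep_fold, PySem.List.length_pyRange_one]
    simp
  rw [hfun, PySem.List.foldl_append_eq_flatMap, List.nil_append]
  unfold flatS
  rw [List.reverse_flatMap]
  congr 1
  funext vc
  simp [List.reverse_replicate]

theorem foldlB_small {k : Int} (hk : ¬ 2 ≤ k) (arr : List Int) :
    ∀ s, arr.foldl (fun s num => stepB k s num) s = arr.reverse ++ s := by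
  induction arr with
  | nil => intro s; simp
  | cons a t ih => intro s; simp [stepB_small hk]

theorem mergeA_ne {k v num c : Int} {rest : List (Int × Int)} (h : v ≠ num) :
    mergeA k ((v, c) :: rest) num = (num, 1) :: (v, c) :: rest := by
  simp [mergeA, h]

theorem A_clean (k : Int) :
    ∀ (arr : List Int) (v : Int) (s : List (Int × Int)), (v :: arr).IsChain (· ≠ ·) →
      arr.foldl (fun s num => mergeA k s num) ((v, 1) :: s)
        = (arr.reverse.map (fun x => (x, 1))) ++ (v, 1) :: s := by
  intro arr
  induction arr with
  | nil => intro v s _; simp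
  | cons b t ih =>
    intro v s hch
    rw [List.isChain_cons_cons] at hch
    simp only [List.foldl_cons, mergeA_ne hch.1, List.reverse_cons, List.map_append]
    simpa using ih b ((v, 1) :: s) hch.2

theorem zip_ne_chain : ∀ (arr : List Int),
    (arr.zip arr.tail).any (fun p => p.1 == p.2) = false → arr.IsChain (· ≠ ·) := by
  intro arr
  induction arr with
  | nil => intro _; exact List.isChain_nil
  | cons a t ih =>
    intro h
    cases t with
    | nil => exact List.isChain_singleton _
    | cons b u =>
      simp only [List.tail_cons, List.zip_cons_cons, List.any_cons, Bool.or_eq_false_iff] at h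
      refine List.isChain_cons_cons.mpr ⟨by simpa using h.1, ih ?_⟩
      cases u with
      | nil => simp
      | cons c w => simpa using h.2

-- ===== VERDICT (by name: the statement is the Claim_ definition above) =====
theorem compress_array_k_spec : Claim_unchanged_compress_array_k := by
  intro arr k _ hnd
  unfold compress_array_k compress_array_k_alt
  by_cases hk : 2 ≤ k
  · have h := foldl_step_merge k hk arr [] ⟨by simp, List.isChain_nil⟩
    have hflat : flatS ([] : List (Int × Int)) = [] := rfl
    rw [phaseA, ← h.1, hflat]
  · unfold D_compress_array_k at hnd
    have hk2 : k < 2 := by omega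
    have hz : (arr.zip arr.tail).any (fun p => p.1 == p.2) = false :=
      Bool.eq_false_iff.mpr (fun h => hnd ⟨hk2, h⟩)
    have hch := zip_ne_chain arr hz
    rw [foldlB_small hk arr []]
    cases arr with
    | nil => simp
    | cons a t =>
      simp only [List.foldl_cons]
      have hm : mergeA k [] a = [(a, 1)] := by simp [mergeA]
      rw [hm, A_clean k t a [] hch, phaseA]
      have h1 : flatS ((t.reverse.map (fun x => (x, 1))) ++ [(a, 1)]) = t.reverse ++ [a] := by
        unfold flatS
        rw [List.flatMap_append, List.flatMap_map]
        simp
      rw [h1]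
      simp

theorem compress_array_k_changed : Claim_changed_compress_array_k := by
  unfold Claim_changed_compress_array_k
  refine ⟨by decide, by decide, by decide, ?_, by decide⟩
  show compress_array_k_alt [2, 2] 1 = [2, 2]
  unfold compress_array_k_alt
  simp only [List.foldl_cons, List.foldl_nil]
  rw [stepB_small (by norm_num), stepB_small (by norm_num)]
  rfl
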